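-- pv_equiv track=rewrite | github.com/hijaiyyahmath/hijaiyyahtech | scripts/debug/hc18dc_jeem_trace_v01.py | normalize_vortex
-- ===== SOURCE A (Python) =====
-- def normalize_vortex(tokens):
--     out = []
--     i = 0
--     def mid_ok(tok):
--         return tok.startswith("D") or tok in ("SEG_K","SEG_Q")
--     while i < len(tokens):
--         if tokens[i] in ("TURN+Q1","TURN-Q1"):
--             t = tokens[i]
--             sign = t[4]  # +/-
--             j = i + 1
--             while j < len(tokens) and mid_ok(tokens[j]): j += 1
--             if j < len(tokens) and tokens[j] == f"TURN{sign}Q1":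
--                 j2 = j + 1
--                 while j2 < len(tokens) and mid_ok(tokens[j2]): j2 += 1
--                 if j2 < len(tokens) and tokens[j2] == f"TURN{sign}Q1":
--                     out.append("JIM_VORTEX(Q3)")
--                     i = j2 + 1
--                     continue
--         out.append(tokens[i])
--         i += 1
--     return out
-- ===== SOURCE B (Python) =====
-- def normalize_vortex(tokens):
--     def mid_ok(tok):
--         return tok.startswith("D") or tok in ("SEG_K", "SEG_Q")
--     n = len(tokens)
--     # jump table: nxt[k] = first index >= k whose token is not mid_ok (nxt[n] = n)
--     nxt = [n] * (n + 1)
--     for k in range(n - 1, -1, -1):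
--         nxt[k] = nxt[k + 1] if mid_ok(tokens[k]) else k
--     out = []
--     i = 0
--     while i < n:
--         t = tokens[i]
--         if t in ("TURN+Q1", "TURN-Q1"):
--             pat = "TURN" + t[4] + "Q1"
--             a = nxt[i + 1]
--             if a < n and tokens[a] == pat:
--                 b = nxt[a + 1]
--                 if b < n and tokens[b] == pat:
--                     out.append("JIM_VORTEX(Q3)")
--                     i = b + 1
--                     continue
--         out.append(t)
--         i += 1
--     return out
-- ===== Notes on version B (the rewrite author's own statement) =====
-- stated objective: alternative
-- what changed: B precomputes in one right-to-left pass a jump table nxt[k] = first index >= k whose token is not mid_ok, and the main loop replaces A's two inner while-scans with table lookups.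
import Mathlib
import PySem

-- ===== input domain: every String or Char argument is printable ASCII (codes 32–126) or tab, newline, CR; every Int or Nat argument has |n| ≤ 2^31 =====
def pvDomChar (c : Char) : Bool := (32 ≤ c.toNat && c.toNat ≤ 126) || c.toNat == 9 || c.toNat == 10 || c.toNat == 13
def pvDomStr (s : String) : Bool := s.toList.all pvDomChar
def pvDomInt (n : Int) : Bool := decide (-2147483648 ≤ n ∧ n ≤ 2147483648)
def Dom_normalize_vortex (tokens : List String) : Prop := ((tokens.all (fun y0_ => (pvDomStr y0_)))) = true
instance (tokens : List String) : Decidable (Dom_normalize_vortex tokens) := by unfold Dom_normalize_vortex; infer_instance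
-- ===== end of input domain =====

-- B replaces A's inner while-scans over mid_ok runs by a jump table built in one
-- right-to-left pass (alternative decomposition; same observable result).
-- ===== PORT A =====
-- mid_ok(tok): tok.startswith("D") or tok in ("SEG_K","SEG_Q")
def pvMidOk (tok : String) : Bool :=
  PySem.Str.startswith tok "D" || tok == "SEG_K" || tok == "SEG_Q"

-- f"TURN{sign}Q1" with sign = t[4]; t is 7 chars long wherever this is used, so the
-- getD "" default of pyGet? is unreachable
def pvPat (t : String) : String :=
  "TURN" ++ String.ofList [(PySem.Str.pyGet? t 4).getD ' '] ++ "Q1"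

-- A's inner `while j < len(tokens) and mid_ok(tokens[j]): j += 1`
def pvSkip (tokens : List String) (j : Nat) : Nat :=
  if j < tokens.length ∧ pvMidOk (tokens.getD j "") = true then pvSkip tokens (j + 1)
  else j
termination_by tokens.length - j
decreasing_by omega

-- lower bound on pvSkip, cited by pvLoopA's decreasing_by
theorem pvSkip_ge (tokens : List String) (j : Nat) : j ≤ pvSkip tokens j := by
  rw [pvSkip.eq_def]
  split
  · have := pvSkip_ge tokens (j + 1); omega
  · omega
termination_by tokens.length - j
decreasing_by omega

-- A's outer while-loop (i, out are the loop state)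
def pvLoopA (tokens : List String) (i : Nat) (out : List String) : List String :=
  if i < tokens.length then
    if (tokens.getD i "" == "TURN+Q1" || tokens.getD i "" == "TURN-Q1") = true then
      if pvSkip tokens (i + 1) < tokens.length ∧
          (tokens.getD (pvSkip tokens (i + 1)) "" == pvPat (tokens.getD i "")) = true then
        if pvSkip tokens (pvSkip tokens (i + 1) + 1) < tokens.length ∧
            (tokens.getD (pvSkip tokens (pvSkip tokens (i + 1) + 1)) "" == pvPat (tokens.getD i "")) = true then
          pvLoopA tokens (pvSkip tokens (pvSkip tokens (i + 1) + 1) + 1) (out ++ ["JIM_VORTEX(Q3)"])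
        else pvLoopA tokens (i + 1) (out ++ [tokens.getD i ""])
      else pvLoopA tokens (i + 1) (out ++ [tokens.getD i ""])
    else pvLoopA tokens (i + 1) (out ++ [tokens.getD i ""])
  else out
termination_by tokens.length - i
decreasing_by
  · have h1 := pvSkip_ge tokens (i + 1)
    have h2 := pvSkip_ge tokens (pvSkip tokens (i + 1) + 1)
    omega
  · omega
  · omega
  · omega

def normalize_vortex (tokens : List String) : List String := pvLoopA tokens 0 []

-- ===== PORT B =====
-- Source B fills nxt[k] for k = n-1 down to 0 (nxt[k] = nxt[k+1] if mid_ok(tokens[k]) else k,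
-- seeded with nxt[n] = n); ported as the obvious structural recursion producing, in the
-- same right-to-left order, the filled suffix nxt[k..n] as a list.
def pvBuildNxt (tokens : List String) (k : Nat) : List Nat :=
  if k < tokens.length then
    let tail := pvBuildNxt tokens (k + 1)
    (if pvMidOk (tokens.getD k "") = true then tail.headD (k + 1) else k) :: tail
  else [tokens.length]
termination_by tokens.length - k
decreasing_by omega

theorem pvBuildNxt_ne_nil (tokens : List String) (k : Nat) : pvBuildNxt tokens k ≠ [] := by
  rw [pvBuildNxt.eq_def]; split <;> simp

-- lower bound on the table entries, cited by pvLoopB's decreasing_by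
theorem pvBuildNxt_getD_ge (tokens : List String) (k j : Nat) (h : k + j ≤ tokens.length) :
    k + j ≤ (pvBuildNxt tokens k).getD j tokens.length := by
  rw [pvBuildNxt.eq_def]
  by_cases hk : k < tokens.length
  · simp only [if_pos hk]
    cases j with
    | zero =>
      rw [Nat.add_zero, List.getD_cons_zero]
      by_cases hm : pvMidOk (tokens.getD k "") = true
      · rw [if_pos hm]
        have h2 := pvBuildNxt_getD_ge tokens (k + 1) 0 (by omega)
        obtain ⟨x, xs, hx⟩ := List.exists_cons_of_ne_nil (pvBuildNxt_ne_nil tokens (k + 1))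
        rw [hx] at h2 ⊢
        rw [List.getD_cons_zero] at h2
        rw [List.headD_cons]
        omega
      · rw [if_neg hm]
    | succ j' =>
      have h2 := pvBuildNxt_getD_ge tokens (k + 1) j' (by omega)
      simp only [List.getD_cons_succ]
      omega
  · simp only [if_neg hk]
    have hkj : k = tokens.length ∧ j = 0 := by omega
    simp [hkj.1, hkj.2]
termination_by tokens.length - k
decreasing_by all_goals omega

-- Source B's main while-loop; the hn argument is only used to prove termination
def pvLoopB (tokens : List String) (nxt : List Nat) (hn : nxt = pvBuildNxt tokens 0)
    (i : Nat) (out : List String) : List String :=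
  if i < tokens.length then
    if (tokens.getD i "" == "TURN+Q1" || tokens.getD i "" == "TURN-Q1") = true then
      if nxt.getD (i + 1) tokens.length < tokens.length ∧
          (tokens.getD (nxt.getD (i + 1) tokens.length) "" == pvPat (tokens.getD i "")) = true then
        if nxt.getD (nxt.getD (i + 1) tokens.length + 1) tokens.length < tokens.length ∧
            (tokens.getD (nxt.getD (nxt.getD (i + 1) tokens.length + 1) tokens.length) "" == pvPat (tokens.getD i "")) = true then
          pvLoopB tokens nxt hn (nxt.getD (nxt.getD (i + 1) tokens.length + 1) tokens.length + 1)
            (out ++ ["JIM_VORTEX(Q3)"])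
        else pvLoopB tokens nxt hn (i + 1) (out ++ [tokens.getD i ""])
      else pvLoopB tokens nxt hn (i + 1) (out ++ [tokens.getD i ""])
    else pvLoopB tokens nxt hn (i + 1) (out ++ [tokens.getD i ""])
  else out
termination_by tokens.length - i
decreasing_by
  · subst hn
    have g1 := pvBuildNxt_getD_ge tokens 0 (i + 1) (by omega)
    have g2 := pvBuildNxt_getD_ge tokens 0
      ((pvBuildNxt tokens 0).getD (i + 1) tokens.length + 1) (by omega)
    omega
  · omega
  · omega
  · omega

def normalize_vortex_alt (tokens : List String) : List String :=
  pvLoopB tokens (pvBuildNxt tokens 0) rfl 0 []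

-- ===== PRECONDITION & SPEC =====
def Spec_normalize_vortex (tokens : List String) (out : List String) : Prop := out = normalize_vortex_alt tokens
instance (tokens : List String) (out : List String) : Decidable (Spec_normalize_vortex tokens out) := by unfold Spec_normalize_vortex; infer_instance

-- ===== CLAIM (what is proved, stated in full; the proofs are below) =====
def Claim_equal_normalize_vortex : Prop := ∀ (tokens : List String), Dom_normalize_vortex tokens → Spec_normalize_vortex tokens (normalize_vortex tokens)

-- ===== LEMMAS AND PROOFS =====
-- table correctness: entry j of the table built from k is A's scan result from k+j
theorem pvBuildNxt_getD_eq (tokens : List String) (k j : Nat) (h : k + j ≤ tokens.length) :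
    (pvBuildNxt tokens k).getD j tokens.length = pvSkip tokens (k + j) := by
  rw [pvBuildNxt.eq_def]
  by_cases hk : k < tokens.length
  · simp only [if_pos hk]
    cases j with
    | zero =>
      rw [Nat.add_zero, List.getD_cons_zero, pvSkip.eq_def]
      by_cases hm : pvMidOk (tokens.getD k "") = true
      · rw [if_pos hm, if_pos ⟨hk, hm⟩]
        have h2 := pvBuildNxt_getD_eq tokens (k + 1) 0 (by omega)
        obtain ⟨x, xs, hx⟩ := List.exists_cons_of_ne_nil (pvBuildNxt_ne_nil tokens (k + 1))
        rw [hx] at h2 ⊢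
        rw [List.getD_cons_zero] at h2
        rw [List.headD_cons, h2]
      · rw [if_neg hm, if_neg (by exact fun hc => hm hc.2)]
        omega
    | succ j' =>
      rw [List.getD_cons_succ]
      have h2 := pvBuildNxt_getD_eq tokens (k + 1) j' (by omega)
      rw [h2]
      congr 1
      omega
  · have hkj : k = tokens.length ∧ j = 0 := by omega
    rw [if_neg hk, hkj.1, hkj.2, List.getD_cons_zero, pvSkip.eq_def,
      if_neg (by simp)]
    omega
termination_by tokens.length - k
decreasing_by all_goals omega

theorem pvLoop_eq (tokens : List String) :
    ∀ (m i : Nat) (out : List String), tokens.length - i ≤ m →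
      pvLoopA tokens i out = pvLoopB tokens (pvBuildNxt tokens 0) rfl i out := by
  intro m
  induction m with
  | zero =>
    intro i out hm
    rw [pvLoopA.eq_def, pvLoopB.eq_def]
    have hi : ¬ i < tokens.length := by omega
    rw [if_neg hi, if_neg hi]
  | succ m ih =>
    intro i out hm
    rw [pvLoopA.eq_def, pvLoopB.eq_def]
    by_cases hi : i < tokens.length
    · rw [if_pos hi, if_pos hi]
      by_cases ht : (tokens.getD i "" == "TURN+Q1" || tokens.getD i "" == "TURN-Q1") = true
      · rw [if_pos ht, if_pos ht]
        have e1 : (pvBuildNxt tokens 0).getD (i + 1) tokens.length = pvSkip tokens (i + 1) := by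
          have := pvBuildNxt_getD_eq tokens 0 (i + 1) (by omega)
          simpa using this
        rw [e1]
        by_cases hc1 : pvSkip tokens (i + 1) < tokens.length ∧
            (tokens.getD (pvSkip tokens (i + 1)) "" == pvPat (tokens.getD i "")) = true
        · rw [if_pos hc1, if_pos hc1]
          have e2 : (pvBuildNxt tokens 0).getD (pvSkip tokens (i + 1) + 1) tokens.length
              = pvSkip tokens (pvSkip tokens (i + 1) + 1) := by
            have := pvBuildNxt_getD_eq tokens 0 (pvSkip tokens (i + 1) + 1) (by omega)
            simpa using this
          rw [e2]
          by_cases hc2 : pvSkip tokens (pvSkip tokens (i + 1) + 1) < tokens.length ∧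
              (tokens.getD (pvSkip tokens (pvSkip tokens (i + 1) + 1)) "" == pvPat (tokens.getD i "")) = true
          · rw [if_pos hc2, if_pos hc2]
            have g1 := pvSkip_ge tokens (i + 1)
            have g2 := pvSkip_ge tokens (pvSkip tokens (i + 1) + 1)
            exact ih _ _ (by omega)
          · rw [if_neg hc2, if_neg hc2]
            exact ih _ _ (by omega)
        · rw [if_neg hc1, if_neg hc1]
          exact ih _ _ (by omega)
      · rw [if_neg ht, if_neg ht]
        exact ih _ _ (by omega)
    · rw [if_neg hi, if_neg hi]

-- ===== VERDICT (by name: the statement is the Claim_ definition above) =====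
theorem normalize_vortex_spec : Claim_equal_normalize_vortex := by
  intro tokens _
  unfold Spec_normalize_vortex normalize_vortex normalize_vortex_alt
  exact pvLoop_eq tokens tokens.length 0 [] (by omega)
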